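-- pv_equiv track=rewrite | github.com/nfbilliet/ProgrammingPortfolio | python/Bioinformatics_Rosalind/Mortal Fibonacci Rabbits/main.py | MortalFibonacciRabbits
-- ===== SOURCE A (Python) =====
-- def MortalFibonacciRabbits(n,m, starting_pop = 1):
--     rabbitPopulation = [1]*starting_pop
--     counter = 1
--     while counter<n:
--         newRabbitPopulation = []
--         for rabbitPair in rabbitPopulation:
--             if rabbitPair == 1:
--                 newRabbitPopulation.append(2)
--             elif rabbitPair > 1 and rabbitPair < m:
--                 newRabbitPopulation += [rabbitPair+1,1]
--             else:
--                 newRabbitPopulation += [1]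
--         rabbitPopulation = newRabbitPopulation
--         counter += 1
--     return len(rabbitPopulation)
-- ===== SOURCE B (Python) =====
-- def MortalFibonacciRabbits(n, m, starting_pop=1):
--     # DP over counts-per-age instead of an explicit list of rabbit pairs.
--     counts = {1: starting_pop if starting_pop > 0 else 0}
--     counter = 1
--     while counter < n:
--         new = {}
--         for age, c in counts.items():
--             if age == 1:
--                 new[2] = new.get(2, 0) + c
--             elif age > 1 and age < m:
--                 new[age + 1] = new.get(age + 1, 0) + c
--                 new[1] = new.get(1, 0) + c
--             else:
--                 new[1] = new.get(1, 0) + c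
--         counts = new
--         counter += 1
--     return sum(counts.values())
-- ===== Notes on version B (the rewrite author's own statement) =====
-- stated objective: faster
-- what changed: Replaces the explicit list of one entry per rabbit pair (which grows like Fib(n)) by a dict of counts per age, applying the same per-age transitions to the counts and summing at the end; intended as faster (measured: a timing run's A timed out already at n=16 while B returned, so no ratio could be read at a common largest size).
import Mathlib
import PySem

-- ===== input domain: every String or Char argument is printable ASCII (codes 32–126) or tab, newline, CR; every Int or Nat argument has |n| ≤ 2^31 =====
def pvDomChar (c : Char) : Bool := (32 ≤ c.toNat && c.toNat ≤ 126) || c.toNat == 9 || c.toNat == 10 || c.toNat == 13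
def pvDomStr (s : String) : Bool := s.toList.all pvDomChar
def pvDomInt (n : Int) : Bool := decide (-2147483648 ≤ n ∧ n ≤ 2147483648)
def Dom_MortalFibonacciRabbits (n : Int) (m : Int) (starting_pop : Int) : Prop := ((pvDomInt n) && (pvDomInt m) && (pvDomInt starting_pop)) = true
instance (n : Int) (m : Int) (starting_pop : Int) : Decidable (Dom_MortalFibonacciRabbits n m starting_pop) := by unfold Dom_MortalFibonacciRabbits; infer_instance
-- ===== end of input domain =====

-- B replaces A's explicit per-pair list (size ~ Fib(n)) by a dict of counts per age (DP), summed at the end.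

-- ===== PORT A =====
-- one month's transition on the explicit population list (one Int age per rabbit pair)
def pvStepA (m : Int) (pop : List Int) : List Int :=
  pop.foldl (fun acc r =>
    if r == 1 then acc ++ [2]
    else if r > 1 && r < m then acc ++ [r + 1, 1]
    else acc ++ [1]) []

-- 'while counter < n' starting at counter = 1: (n-1).toNat iterations
def pvLoopA (m : Int) : Nat → List Int → List Int
  | 0, pop => pop
  | t + 1, pop => pvLoopA m t (pvStepA m pop)

def MortalFibonacciRabbits (n : Int) (m : Int) (starting_pop : Int) : Int :=
  ((pvLoopA m (n - 1).toNat (List.replicate starting_pop.toNat (1 : Int))).length : Int)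

-- ===== PORT B =====
-- new[k] = new.get(k, 0) + c
def pvBump (d : PySem.Dict Int Int) (k c : Int) : PySem.Dict Int Int :=
  d.insert k (d.getD k 0 + c)

def pvStepB (m : Int) (d : PySem.Dict Int Int) : PySem.Dict Int Int :=
  d.items.foldl (fun nd p =>
    if p.1 == 1 then pvBump nd 2 p.2
    else if p.1 > 1 && p.1 < m then pvBump (pvBump nd (p.1 + 1) p.2) 1 p.2
    else pvBump nd 1 p.2) PySem.Dict.empty

def pvLoopB (m : Int) : Nat → PySem.Dict Int Int → PySem.Dict Int Int
  | 0, d => d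
  | t + 1, d => pvLoopB m t (pvStepB m d)

def MortalFibonacciRabbits_alt (n : Int) (m : Int) (starting_pop : Int) : Int :=
  let init := PySem.Dict.empty.insert (1 : Int) (if starting_pop > 0 then starting_pop else 0)
  (pvLoopB m (n - 1).toNat init).values.sum

-- ===== PRECONDITION & SPEC =====
def Spec_MortalFibonacciRabbits (n : Int) (m : Int) (starting_pop : Int) (out : Int) : Prop := out = MortalFibonacciRabbits_alt n m starting_pop
instance (n : Int) (m : Int) (starting_pop : Int) (out : Int) : Decidable (Spec_MortalFibonacciRabbits n m starting_pop out) := by unfold Spec_MortalFibonacciRabbits; infer_instance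

-- ===== CLAIM (what is proved, stated in full; the proofs are below) =====
def Claim_equal_MortalFibonacciRabbits : Prop := ∀ (n : Int) (m : Int) (starting_pop : Int), Dom_MortalFibonacciRabbits n m starting_pop → Spec_MortalFibonacciRabbits n m starting_pop (MortalFibonacciRabbits n m starting_pop)

-- ===== LEMMAS AND PROOFS =====

-- the per-rabbit transition as a function
def pvF (m r : Int) : List Int :=
  if r = 1 then [2] else if 1 < r ∧ r < m then [r + 1, 1] else [1]

theorem pvStepA_eq (m : Int) (pop : List Int) :
    pvStepA m pop = pop.flatMap (pvF m) := by
  unfold pvStepA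
  have hbody : (fun (acc : List Int) (r : Int) =>
      if r == 1 then acc ++ [2]
      else if r > 1 && r < m then acc ++ [r + 1, 1]
      else acc ++ [1]) = fun acc r => acc ++ pvF m r := by
    funext acc r
    simp only [pvF]
    by_cases h1 : r = 1 <;> by_cases h2 : 1 < r ∧ r < m <;>
      simp [h1, h2]
  rw [hbody, PySem.List.foldl_append_eq_flatMap]
  simp

-- bump lookup
theorem pvBump_getD (d : PySem.Dict Int Int) (k c a : Int) :
    (pvBump d k c).getD a 0 = d.getD a 0 + (if a = k then c else 0) := by
  unfold pvBump
  rw [PySem.Dict.getD_insert]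
  by_cases h : a = k <;> simp [h]

theorem pvBump_nodup (d : PySem.Dict Int Int) (k c : Int) (h : d.keys.Nodup) :
    (pvBump d k c).keys.Nodup := PySem.Dict.nodup_keys_insert d k _ h

-- the invariant relating A's population list to B's counts dict
def pvR (pop : List Int) (d : PySem.Dict Int Int) : Prop :=
  (∀ a : Int, d.getD a 0 = (pop.count a : Int)) ∧ d.keys.Nodup

-- contribution of one rabbit of age k, with multiplicity c, to the count of age a next month
def pvContrib (m a : Int) (p : Int × Int) : Int := p.2 * ((pvF m p.1).count a : Int)

theorem pvStepB_fold_getD (m a : Int) (L : List (Int × Int)) :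
    ∀ d0 : PySem.Dict Int Int,
      (L.foldl (fun nd p =>
        if p.1 == 1 then pvBump nd 2 p.2
        else if p.1 > 1 && p.1 < m then pvBump (pvBump nd (p.1 + 1) p.2) 1 p.2
        else pvBump nd 1 p.2) d0).getD a 0
      = d0.getD a 0 + (L.map (pvContrib m a)).sum := by
  induction L with
  | nil => intro d0; simp
  | cons p L ih =>
    intro d0
    simp only [List.foldl_cons, List.map_cons, List.sum_cons]
    rw [ih]
    have hcon : (if p.1 == 1 then pvBump d0 2 p.2
        else if p.1 > 1 && p.1 < m then pvBump (pvBump d0 (p.1 + 1) p.2) 1 p.2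
        else pvBump d0 1 p.2).getD a 0 = d0.getD a 0 + pvContrib m a p := by
      unfold pvContrib pvF
      by_cases h1 : p.1 = 1
      · rw [if_pos (by simp [h1]), if_pos h1, pvBump_getD]
        by_cases ha : a = 2 <;>
          simp [ha, List.count_cons, List.count_nil] <;> omega
      · rw [if_neg (by simp [h1]), if_neg h1]
        by_cases h2 : 1 < p.1 ∧ p.1 < m
        · rw [if_pos (by simp only [Bool.and_eq_true, decide_eq_true_eq]; exact ⟨h2.1, h2.2⟩),
            if_pos h2, pvBump_getD, pvBump_getD]
          have hp0 : p.1 ≠ 0 := by omega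
          by_cases ha1 : a = 1 <;> by_cases ha2 : a = p.1 + 1 <;>
            simp [ha1, ha2, hp0, List.count_cons, List.count_nil] <;> omega
        · rw [if_neg (by simp only [Bool.and_eq_true, decide_eq_true_eq]; exact h2),
            if_neg h2, pvBump_getD]
          by_cases ha : a = 1 <;>
            simp [ha, List.count_cons, List.count_nil] <;> omega
    rw [hcon]; ring

theorem pvStepB_fold_nodup (m : Int) (L : List (Int × Int)) :
    ∀ d0 : PySem.Dict Int Int, d0.keys.Nodup →
      (L.foldl (fun nd p =>
        if p.1 == 1 then pvBump nd 2 p.2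
        else if p.1 > 1 && p.1 < m then pvBump (pvBump nd (p.1 + 1) p.2) 1 p.2
        else pvBump nd 1 p.2) d0).keys.Nodup := by
  induction L with
  | nil => intro d0 h; simpa using h
  | cons p L ih =>
    intro d0 h
    simp only [List.foldl_cons]
    apply ih
    split_ifs <;> first
      | exact pvBump_nodup _ _ _ h
      | exact pvBump_nodup _ _ _ (pvBump_nodup _ _ _ h)

-- sum of h over pop equals the count-weighted sum over any nodup superset of pop's values
theorem pvSum_map_eq_counts (h : Int → Int) (ks : List Int) :
    ∀ pop : List Int, ks.Nodup → (∀ r ∈ pop, r ∈ ks) →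
      (pop.map h).sum = (ks.map (fun k => (pop.count k : Int) * h k)).sum := by
  induction ks with
  | nil =>
    intro pop _ hsub
    have : pop = [] := by
      cases pop with
      | nil => rfl
      | cons x xs => exact absurd (hsub x (by simp)) (by simp)
    simp [this]
  | cons k ks ih =>
    intro pop hnd hsub
    have hperm := List.filter_append_perm (fun r => r == k) pop
    have hsum : (pop.map h).sum
        = ((pop.filter (fun r => r == k)).map h).sum
          + ((pop.filter (fun r => !(r == k))).map h).sum := by
      have := (hperm.map h).sum_eq
      simpa [List.map_append] using this.symm
    have hfil : pop.filter (fun r => r == k) = List.replicate (List.count k pop) k := by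
      simpa using List.filter_beq (l := pop) (a := k)
    have h1 : ((pop.filter (fun r => r == k)).map h).sum = (List.count k pop : Int) * h k := by
      rw [hfil, List.map_replicate, List.sum_replicate]
      simp [mul_comm]
    have hsub' : ∀ r ∈ pop.filter (fun r => !(r == k)), r ∈ ks := by
      intro r hr
      simp only [List.mem_filter, Bool.not_eq_eq_eq_not, Bool.not_true,
        beq_eq_false_iff_ne] at hr
      rcases List.mem_cons.mp (hsub r hr.1) with h' | h'
      · exact absurd h' hr.2
      · exact h'
    have hnd' : ks.Nodup := (List.nodup_cons.mp hnd).2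
    have hknotin : k ∉ ks := (List.nodup_cons.mp hnd).1
    have hcount : ∀ k' ∈ ks, (pop.filter (fun r => !(r == k))).count k' = pop.count k' := by
      intro k' hk'
      have hne : k' ≠ k := fun he => hknotin (he ▸ hk')
      rw [List.count_filter]
      simp [hne]
    have ih' := ih (pop.filter (fun r => !(r == k))) hnd' hsub'
    rw [hsum, h1, ih']
    simp only [List.map_cons, List.sum_cons]
    congr 1
    apply congrArg List.sum
    apply List.map_congr_left
    intro k' hk'
    rw [hcount k' hk']

theorem pvFlatMap_count (g : Int → List Int) (a : Int) :
    ∀ pop : List Int, ((pop.flatMap g).count a : Int) = (pop.map (fun r => ((g r).count a : Int))).sum := by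
  intro pop
  induction pop with
  | nil => simp
  | cons r pop ih => simp [List.flatMap_cons, List.count_append, ih]

theorem pvMem_keys_of_mem_pop (pop : List Int) (d : PySem.Dict Int Int)
    (h : ∀ a : Int, d.getD a 0 = (pop.count a : Int)) :
    ∀ r ∈ pop, r ∈ d.keys := by
  intro r hr
  by_contra hnot
  have hc : d.contains r = false := by
    cases hcc : d.contains r
    · rfl
    · exact absurd ((PySem.Dict.contains_iff_mem_keys d r).mp hcc) hnot
  have h0 : d.getD r 0 = 0 := PySem.Dict.getD_of_not_contains d 0 hc
  have hpos : 0 < pop.count r := List.count_pos_iff.mpr hr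
  rw [h r] at h0
  omega

theorem pvStep_preserve (m : Int) (pop : List Int) (d : PySem.Dict Int Int)
    (h : pvR pop d) : pvR (pop.flatMap (pvF m)) (pvStepB m d) := by
  obtain ⟨hcnt, hnd⟩ := h
  constructor
  · intro a
    unfold pvStepB
    rw [pvStepB_fold_getD]
    rw [PySem.Dict.getD_empty, zero_add]
    rw [PySem.Dict.items_eq_map_keys d hnd 0]
    rw [pvFlatMap_count]
    rw [pvSum_map_eq_counts (fun r => ((pvF m r).count a : Int)) d.keys pop hnd
      (pvMem_keys_of_mem_pop pop d hcnt)]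
    rw [List.map_map]
    apply congrArg List.sum
    apply List.map_congr_left
    intro k _
    simp only [Function.comp, pvContrib]
    rw [hcnt k]
  · exact pvStepB_fold_nodup m d.items PySem.Dict.empty PySem.Dict.nodup_keys_empty

theorem pvLoop_preserve (m : Int) (t : Nat) :
    ∀ (pop : List Int) (d : PySem.Dict Int Int), pvR pop d →
      pvR (pvLoopA m t pop) (pvLoopB m t d) := by
  induction t with
  | zero => intro pop d h; exact h
  | succ t ih =>
    intro pop d h
    simp only [pvLoopA, pvLoopB]
    apply ih
    rw [pvStepA_eq]
    exact pvStep_preserve m pop d h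

theorem pvR_init (sp : Int) :
    pvR (List.replicate sp.toNat (1 : Int))
      (PySem.Dict.empty.insert (1 : Int) (if sp > 0 then sp else 0)) := by
  constructor
  · intro a
    rw [PySem.Dict.getD_insert]
    by_cases h : a = 1
    · rw [if_pos h, h, List.count_replicate_self]
      omega
    · rw [if_neg h, PySem.Dict.getD_empty, List.count_replicate]
      split_ifs with hh
      · exact absurd (show a = 1 by have := of_decide_eq_true hh; omega) h
      · simp
  · exact PySem.Dict.nodup_keys_insert _ _ _ PySem.Dict.nodup_keys_empty

theorem pvR_final (pop : List Int) (d : PySem.Dict Int Int) (h : pvR pop d) :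
    d.values.sum = (pop.length : Int) := by
  obtain ⟨hcnt, hnd⟩ := h
  rw [PySem.Dict.values_eq_map_keys d hnd 0]
  have key := pvSum_map_eq_counts (fun _ => (1 : Int)) d.keys pop hnd
    (pvMem_keys_of_mem_pop pop d hcnt)
  have hl : (pop.map (fun _ => (1 : Int))).sum = (pop.length : Int) := by
    induction pop with
    | nil => simp
    | cons x xs ih => simp at ih ⊢; omega
  simp only [mul_one] at key
  rw [hl] at key
  rw [show (List.map (fun k => d.getD k 0) d.keys)
      = List.map (fun k => ((List.count k pop : Int))) d.keys from
    List.map_congr_left (fun k _ => hcnt k), ← key]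

-- ===== VERDICT (by name: the statement is the Claim_ definition above) =====
theorem MortalFibonacciRabbits_spec : Claim_equal_MortalFibonacciRabbits := by
  intro n m sp _
  unfold Spec_MortalFibonacciRabbits MortalFibonacciRabbits MortalFibonacciRabbits_alt
  have hR := pvLoop_preserve m (n - 1).toNat _ _ (pvR_init sp)
  exact (pvR_final _ _ hR).symm
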